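-- pv_equiv track=rewrite | github.com/jaewoogwak/sit-v2 | boundary_detection/inference_boundary.py | _segment_edges_from_peaks
-- ===== SOURCE A (Python) =====
-- def _unique_sorted_ints(values):
--     out = []
--     seen = set()
--     for v in values:
--         try:
--             iv = int(v)
--         except Exception:
--             continue
--         if iv in seen:
--             continue
--         seen.add(iv)
--         out.append(iv)
--     out.sort()
--     return out
--
-- def _segment_edges_from_peaks(peaks, length):
--     if length <= 0:
--         return [0]
--     peaks = _unique_sorted_ints(peaks)
--     edges = [0]
--     for p in peaks:
--         edge = p + 1
--         if edge <= 0 or edge >= length: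
--             continue
--         if edge != edges[-1]:
--             edges.append(edge)
--     if edges[-1] != length:
--         edges.append(length)
--     return edges
-- ===== SOURCE B (Python) =====
-- def _segment_edges_from_peaks(peaks, length):
--     if length <= 0:
--         return [0]
--     edges = {0, length}
--     for v in peaks:
--         try:
--             edge = int(v) + 1
--         except Exception:
--             continue
--         if 0 < edge < length:
--             edges.add(edge)
--     return sorted(edges)
-- ===== Notes on version B (the rewrite author's own statement) =====
-- stated objective: simpler
-- what changed: Replaces A's two-phase dedup-then-sort of peaks followed by a streaming append with a last-element sentinel by a single pass that drops each valid edge into a set seeded with {0, length} and one terminal sort.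
import Mathlib
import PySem

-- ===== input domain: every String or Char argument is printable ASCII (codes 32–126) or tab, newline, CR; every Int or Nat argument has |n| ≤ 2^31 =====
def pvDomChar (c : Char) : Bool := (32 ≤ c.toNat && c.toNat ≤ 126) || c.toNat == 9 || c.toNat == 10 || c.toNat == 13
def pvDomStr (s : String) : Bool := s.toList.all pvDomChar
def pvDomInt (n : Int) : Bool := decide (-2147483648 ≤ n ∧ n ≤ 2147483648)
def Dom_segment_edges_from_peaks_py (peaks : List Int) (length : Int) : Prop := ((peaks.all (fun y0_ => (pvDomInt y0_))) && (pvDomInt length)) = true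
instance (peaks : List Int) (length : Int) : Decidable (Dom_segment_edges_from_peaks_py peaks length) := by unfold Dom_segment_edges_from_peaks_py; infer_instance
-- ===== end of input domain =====

-- B replaces A's dedup-then-sort of the peaks plus a streaming sentinel append by one
-- set-population pass over peaks (set seeded with 0 and length) and a single terminal sort.


-- ===== PORT A =====
-- _unique_sorted_ints: the arguments are already Int here, so int(v) never raises; the loop
-- keeps first occurrences (out list + seen set), then out.sort() (key = identity).

def uniqueSortedInts (values : List Int) : List Int :=
  let st := values.foldl
    (fun (st : List Int × PySem.Set Int) v =>
      if PySem.Set.contains st.2 v then st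
      else (st.1 ++ [v], PySem.Set.add st.2 v))
    ([], PySem.Set.empty)
  PySem.List.sorted st.1 (fun x => x) false

def segment_edges_from_peaks_py (peaks : List Int) (length : Int) : List Int :=
  if length ≤ 0 then [0]
  else
    let ps := uniqueSortedInts peaks
    let edges := ps.foldl
      (fun (edges : List Int) p =>
        if p + 1 ≤ 0 ∨ p + 1 ≥ length then edges
        else if p + 1 ≠ PySem.List.pyGetD edges (-1) 0 then edges ++ [p + 1]
        else edges)
      [0]
    if PySem.List.pyGetD edges (-1) 0 ≠ length then edges ++ [length] else edges

-- ===== PORT B =====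
def segment_edges_from_peaks_py_alt (peaks : List Int) (length : Int) : List Int :=
  if length ≤ 0 then [0]
  else
    let edges := peaks.foldl
      (fun (s : PySem.Set Int) v =>
        if 0 < v + 1 ∧ v + 1 < length then PySem.Set.add s (v + 1) else s)
      (PySem.Set.ofList [0, length])
    PySem.List.sorted edges (fun x => x) false


-- ===== PRECONDITION & SPEC =====
-- A is total on List Int × Int (int(v) cannot raise on an Int), so there is no Pre_.
def Spec_segment_edges_from_peaks_py (peaks : List Int) (length : Int) (out : List Int) : Prop := out = segment_edges_from_peaks_py_alt peaks length
instance (peaks : List Int) (length : Int) (out : List Int) : Decidable (Spec_segment_edges_from_peaks_py peaks length out) := by unfold Spec_segment_edges_from_peaks_py; infer_instance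

-- ===== CLAIM (what is proved, stated in full; the proofs are below) =====
def Claim_equal_segment_edges_from_peaks_py : Prop := ∀ (peaks : List Int) (length : Int), Dom_segment_edges_from_peaks_py peaks length → Spec_segment_edges_from_peaks_py peaks length (segment_edges_from_peaks_py peaks length)

-- ===== LEMMAS AND PROOFS =====

theorem uniq_aux (values : List Int) (s : PySem.Set Int) :
    values.foldl
      (fun (st : List Int × PySem.Set Int) v =>
        if PySem.Set.contains st.2 v then st
        else (st.1 ++ [v], PySem.Set.add st.2 v))
      (s, s)
    = (values.foldl PySem.Set.add s, values.foldl PySem.Set.add s) := by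
  induction values generalizing s with
  | nil => rfl
  | cons v vs ih =>
    rw [List.foldl_cons, List.foldl_cons]
    cases hb : PySem.Set.contains s v with
    | true =>
      have hm : v ∈ s := by simpa [PySem.Set.contains] using hb
      have ha : PySem.Set.add s v = s := by simp [PySem.Set.add, hm]
      simp only [if_true, ha]
      exact ih s
    | false =>
      have hm : v ∉ s := by simpa [PySem.Set.contains] using hb
      have ha : PySem.Set.add s v = s ++ [v] := by simp [PySem.Set.add, hm]
      simp only [Bool.false_eq_true, if_false, ha]
      rw [← ha]
      exact ih _

theorem uniqueSortedInts_eq (values : List Int) :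
    uniqueSortedInts values = PySem.List.sorted (PySem.Set.ofList values) (fun x => x) false := by
  unfold uniqueSortedInts
  rw [show (([], PySem.Set.empty) : List Int × PySem.Set Int) = ((PySem.Set.empty : PySem.Set Int), (PySem.Set.empty : PySem.Set Int)) from rfl]
  rw [uniq_aux]
  rfl

theorem loopA_eq (length : Int) (ps edges : List Int)
    (hps : ps.Pairwise (· < ·))
    (hlast : ∀ p ∈ ps, 0 < p + 1 → PySem.List.pyGetD edges (-1) 0 < p + 1) :
    ps.foldl
      (fun (edges : List Int) p =>
        if p + 1 ≤ 0 ∨ p + 1 ≥ length then edges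
        else if p + 1 ≠ PySem.List.pyGetD edges (-1) 0 then edges ++ [p + 1] else edges)
      edges
    = edges ++ (ps.filter (fun p => decide (0 < p + 1 ∧ p + 1 < length))).map (· + 1) := by
  induction ps generalizing edges with
  | nil => simp
  | cons p ps ih =>
    have hps' := (List.pairwise_cons.mp hps).2
    have hplt := (List.pairwise_cons.mp hps).1
    rw [List.foldl_cons, List.filter_cons]
    by_cases hv : p + 1 ≤ 0 ∨ p + 1 ≥ length
    · have hfilt : decide (0 < p + 1 ∧ p + 1 < length) = false := by
        simp only [decide_eq_false_iff_not]; omega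
      rw [if_pos hv, hfilt]
      simp only [Bool.false_eq_true, if_false]
      exact ih edges hps' (fun q hq h0 => hlast q (List.mem_cons_of_mem _ hq) h0)
    · have hfilt : decide (0 < p + 1 ∧ p + 1 < length) = true := by
        simp only [decide_eq_true_eq]; omega
      have h0 : 0 < p + 1 := by omega
      have hne : p + 1 ≠ PySem.List.pyGetD edges (-1) 0 := by
        have := hlast p (List.mem_cons_self) h0; omega
      rw [if_neg hv, if_pos hne, hfilt]
      simp only [if_true, List.map_cons]
      rw [ih (edges ++ [p + 1]) hps' ?_]
      · simp
      · intro q hq hq0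
        have hlt := hplt q hq
        have hgl : PySem.List.pyGetD (edges ++ [p + 1]) (-1) 0 = p + 1 := by simp [pysem]
        omega

theorem memB (peaks : List Int) (length : Int) (s0 : PySem.Set Int) (x : Int) :
    (x ∈ peaks.foldl
      (fun (s : PySem.Set Int) v =>
        if 0 < v + 1 ∧ v + 1 < length then PySem.Set.add s (v + 1) else s) s0)
    ↔ x ∈ s0 ∨ ∃ v ∈ peaks, 0 < v + 1 ∧ v + 1 < length ∧ x = v + 1 := by
  induction peaks generalizing s0 with
  | nil => simp
  | cons v vs ih =>
    rw [List.foldl_cons]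
    by_cases h : 0 < v + 1 ∧ v + 1 < length
    · rw [if_pos h, ih]
      simp only [PySem.Set.mem_add]
      constructor
      · rintro (⟨hx | hx⟩ | ⟨w, hw, h1, h2, h3⟩)
        · exact Or.inl hx
        · exact Or.inr ⟨v, List.mem_cons_self, h.1, h.2, hx⟩
        · exact Or.inr ⟨w, List.mem_cons_of_mem _ hw, h1, h2, h3⟩
      · rintro (hx | ⟨w, hw, h1, h2, h3⟩)
        · exact Or.inl (Or.inl hx)
        · rcases List.mem_cons.mp hw with rfl | hw
          · exact Or.inl (Or.inr h3)
          · exact Or.inr ⟨w, hw, h1, h2, h3⟩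
    · rw [if_neg h, ih]
      constructor
      · rintro (hx | ⟨w, hw, h1, h2, h3⟩)
        · exact Or.inl hx
        · exact Or.inr ⟨w, List.mem_cons_of_mem _ hw, h1, h2, h3⟩
      · rintro (hx | ⟨w, hw, h1, h2, h3⟩)
        · exact Or.inl hx
        · rcases List.mem_cons.mp hw with rfl | hw
          · exact absurd ⟨h1, h2⟩ h
          · exact Or.inr ⟨w, hw, h1, h2, h3⟩

theorem nodupB (peaks : List Int) (length : Int) (s0 : PySem.Set Int) (h : s0.Nodup) :
    (peaks.foldl
      (fun (s : PySem.Set Int) v =>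
        if 0 < v + 1 ∧ v + 1 < length then PySem.Set.add s (v + 1) else s) s0).Nodup := by
  induction peaks generalizing s0 with
  | nil => exact h
  | cons v vs ih =>
    rw [List.foldl_cons]
    by_cases hc : 0 < v + 1 ∧ v + 1 < length
    · rw [if_pos hc]
      exact ih _ (PySem.Set.nodup_add s0 (v + 1) (h := h))
    · rw [if_neg hc]
      exact ih _ h

theorem A_eq_B (peaks : List Int) (length : Int) :
    segment_edges_from_peaks_py peaks length = segment_edges_from_peaks_py_alt peaks length := by
  unfold segment_edges_from_peaks_py segment_edges_from_peaks_py_alt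
  by_cases hL : length ≤ 0
  · rw [if_pos hL, if_pos hL]
  · rw [if_neg hL, if_neg hL]
    simp only []
    have hL' : 0 < length := by omega
    set ps := uniqueSortedInts peaks with hpsdef
    have hpseq : ps = PySem.List.sorted (PySem.Set.ofList peaks) (fun x => x) false :=
      uniqueSortedInts_eq peaks
    have hps : ps.Pairwise (· < ·) := by
      rw [hpseq]; exact PySem.List.sorted_ofList_pairwise_lt peaks
    have hmem_ps : ∀ p, p ∈ ps ↔ p ∈ peaks := by
      intro p
      rw [hpseq, PySem.List.mem_sorted, PySem.Set.mem_ofList]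
    -- the A-side loop
    rw [loopA_eq length ps [0] hps ?hl]
    case hl =>
      intro q hq hq0
      have : PySem.List.pyGetD ([0] : List Int) (-1) 0 = 0 := by decide
      omega
    set F := (ps.filter (fun p => decide (0 < p + 1 ∧ p + 1 < length))).map (· + 1) with hFdef
    have hFmem : ∀ x, x ∈ F ↔ ∃ v ∈ peaks, 0 < v + 1 ∧ v + 1 < length ∧ x = v + 1 := by
      intro x
      simp only [hFdef, List.mem_map, List.mem_filter, decide_eq_true_eq]
      constructor
      · rintro ⟨p, ⟨hp, h1, h2⟩, rfl⟩
        exact ⟨p, (hmem_ps p).1 hp, h1, h2, rfl⟩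
      · rintro ⟨v, hv, h1, h2, rfl⟩
        exact ⟨v, ⟨(hmem_ps v).2 hv, h1, h2⟩, rfl⟩
    have hFbound : ∀ x ∈ F, 0 < x ∧ x < length := by
      intro x hx
      obtain ⟨v, _, h1, h2, rfl⟩ := (hFmem x).1 hx
      exact ⟨h1, h2⟩
    have hFpair : F.Pairwise (· < ·) := by
      rw [hFdef, List.pairwise_map]
      exact (hps.filter _).imp (by omega)
    -- the final if: the last element of [0] ++ F is < length, so the branch fires
    have hlast_ne : PySem.List.pyGetD (([0] : List Int) ++ F) (-1) 0 ≠ length := by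
      rcases List.eq_nil_or_concat F with hF | ⟨F', e, hF⟩
      · rw [hF]
        have : PySem.List.pyGetD (([0] : List Int) ++ []) (-1) 0 = 0 := by decide
        omega
      · have he : e ∈ F := by rw [hF]; simp
        have hb := hFbound e he
        have : PySem.List.pyGetD (([0] : List Int) ++ F) (-1) 0 = e := by
          rw [hF, show ([0] : List Int) ++ (F'.concat e) = (([0] : List Int) ++ F') ++ [e] by simp]
          simp [pysem]
        omega
    rw [if_pos hlast_ne]
    -- B side: sorted of the set equals the explicit strictly increasing list
    have hys : (([0] : List Int) ++ F) ++ [length] = 0 :: (F ++ [length]) := by simp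
    rw [hys]
    symm
    apply PySem.List.sorted_eq_of_perm_of_pairwise_lt
    · -- Perm
      apply (List.perm_ext_iff_of_nodup ?nd1 ?nd2).mpr
      case nd1 =>
        -- Nodup of 0 :: (F ++ [length])
        refine List.Pairwise.imp (fun {a b} h => ne_of_lt h) ?_
        rw [List.pairwise_cons]
        constructor
        · intro x hx
          rcases List.mem_append.mp hx with hx | hx
          · exact (hFbound x hx).1
          · simp at hx; omega
        · rw [List.pairwise_append]
          refine ⟨hFpair, List.pairwise_singleton _ _, ?_⟩
          intro x hx y hy
          simp at hy
          subst hy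
          exact (hFbound x hx).2
      case nd2 =>
        apply nodupB
        exact PySem.Set.nodup_ofList _
      · intro x
        rw [memB]
        simp only [PySem.Set.mem_ofList, List.mem_cons, List.mem_append,
          List.not_mem_nil, or_false, hFmem]
        constructor
        · rintro (h | h | h)
          · exact Or.inl (Or.inl h)
          · exact Or.inr h
          · exact Or.inl (Or.inr h)
        · rintro ((h | h) | h)
          · exact Or.inl h
          · exact Or.inr (Or.inr h)
          · exact Or.inr (Or.inl h)
    · -- Pairwise < (key = id)
      rw [List.pairwise_cons]
      constructor
      · intro x hx
        rcases List.mem_append.mp hx with hx | hx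
        · exact (hFbound x hx).1
        · simp at hx; omega
      · rw [List.pairwise_append]
        refine ⟨hFpair, List.pairwise_singleton _ _, ?_⟩
        intro x hx y hy
        simp at hy
        subst hy
        exact (hFbound x hx).2

-- ===== VERDICT (by name: the statement is the Claim_ definition above) =====
theorem segment_edges_from_peaks_py_spec : Claim_equal_segment_edges_from_peaks_py := by
  intro peaks length _
  unfold Spec_segment_edges_from_peaks_py
  exact A_eq_B peaks length
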